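-- pv_equiv track=rewrite | github.com/NICKmop/CODINGTEST_python | LEVEL1/NUmberWordAndengWords.py | checkWithNumber
-- ===== SOURCE A (Python) =====
-- def checkWithNumber(word):
--
--     attachWord = '';
--     wordBox = '';
--     NumberBox = 0;
--
--     for i in word:
--         attachWord += i;
--         if attachWord == "zero":
--             wordBox += attachWord;
--             attachWord = "";
--
--         elif attachWord == "one":
--             wordBox += attachWord;
--             attachWord = "";
--         elif attachWord == "two":
--             wordBox += attachWord;
--             attachWord = "";
--         elif attachWord == "three":
--             wordBox += attachWord;
--             attachWord = "";
--         elif attachWord == "four":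
--             wordBox += attachWord;
--             attachWord = "";
--         elif attachWord == "five":
--             wordBox += attachWord;
--             attachWord = "";
--         elif attachWord == "six":
--             wordBox += attachWord;
--             attachWord = "";
--         elif attachWord == "seven":
--             wordBox += attachWord;
--             attachWord = "";
--         elif attachWord == "eight":
--             wordBox += attachWord;
--             attachWord = "";
--         elif attachWord == "nine":
--             wordBox += attachWord;
--             attachWord = "";
--         elif attachWord == "4":
--             wordBox += attachWord;
--             attachWord = "";
--             # attachWord = "";
--
--     return wordBox;
-- ===== SOURCE B (Python) =====
-- WORDS = ("zero", "one", "two", "three", "four", "five", "six", "seven", "eight", "nine", "4")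
--
-- def checkWithNumber(word):
--     result = ''
--     pos = 0
--     n = len(word)
--     while pos < n:
--         for w in WORDS:
--             if word.startswith(w, pos):
--                 result += w
--                 pos += len(w)
--                 break
--         else:
--             break
--     return result
-- ===== Notes on version B (the rewrite author's own statement) =====
-- stated objective: faster
-- what changed: Replaced A's per-character buffer accumulation (grow attachWord one char at a time and compare the whole buffer against each word; on non-matching input the buffer grows without bound, making the += concatenations quadratic) by a position-based greedy tokenizer that tests startswith at the current index and jumps ahead by whole word lengths in O(n).
import Mathlib
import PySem

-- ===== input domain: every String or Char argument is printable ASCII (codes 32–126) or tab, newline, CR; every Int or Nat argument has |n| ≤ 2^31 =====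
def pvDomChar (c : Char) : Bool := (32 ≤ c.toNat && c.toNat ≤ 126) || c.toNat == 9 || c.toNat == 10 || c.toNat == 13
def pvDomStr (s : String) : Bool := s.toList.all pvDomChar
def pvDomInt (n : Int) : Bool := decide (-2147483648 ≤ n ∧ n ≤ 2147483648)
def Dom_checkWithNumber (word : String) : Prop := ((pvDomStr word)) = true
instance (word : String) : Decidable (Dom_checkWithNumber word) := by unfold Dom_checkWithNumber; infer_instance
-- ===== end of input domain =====

-- B replaces A's grow-a-buffer-and-compare character loop by a position-based greedy
-- tokenizer that jumps ahead by whole word lengths (objective: alternative decomposition).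

-- ===== PORT A =====
-- A's loop state: (attachWord, wordBox), both as lists of chars; one step per character.
def pvStepA (st : List Char × List Char) (i : Char) : List Char × List Char :=
  let attachWord := st.1 ++ [i]
  if attachWord = "zero".toList then ([], st.2 ++ attachWord)
  else if attachWord = "one".toList then ([], st.2 ++ attachWord)
  else if attachWord = "two".toList then ([], st.2 ++ attachWord)
  else if attachWord = "three".toList then ([], st.2 ++ attachWord)
  else if attachWord = "four".toList then ([], st.2 ++ attachWord)
  else if attachWord = "five".toList then ([], st.2 ++ attachWord)
  else if attachWord = "six".toList then ([], st.2 ++ attachWord)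
  else if attachWord = "seven".toList then ([], st.2 ++ attachWord)
  else if attachWord = "eight".toList then ([], st.2 ++ attachWord)
  else if attachWord = "nine".toList then ([], st.2 ++ attachWord)
  else if attachWord = "4".toList then ([], st.2 ++ attachWord)
  else (attachWord, st.2)

def checkWithNumber (word : String) : String :=
  String.ofList (word.toList.foldl pvStepA ([], [])).2

-- ===== PORT B =====
-- the WORDS tuple of Source B
def pvWords : List (List Char) :=
  ["zero".toList, "one".toList, "two".toList, "three".toList, "four".toList,
   "five".toList, "six".toList, "seven".toList, "eight".toList, "nine".toList, "4".toList]

-- Source B's `while pos < n` loop; the suffix `cs` plays the role of `word[pos:]`,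
-- `word.startswith(w, pos)` is `w.isPrefixOf cs`; `fuel` is only a totality guard.
def pvGoB (fuel : Nat) (cs acc : List Char) : List Char :=
  match fuel with
  | 0 => acc
  | fuel + 1 =>
    match pvWords.find? (fun w => w.isPrefixOf cs) with
    | none => acc
    | some w => pvGoB fuel (cs.drop w.length) (acc ++ w)

def checkWithNumber_alt (word : String) : String :=
  String.ofList (pvGoB word.toList.length word.toList [])

-- ===== PRECONDITION & SPEC =====
def Spec_checkWithNumber (word : String) (out : String) : Prop := out = checkWithNumber_alt word
instance (word : String) (out : String) : Decidable (Spec_checkWithNumber word out) := by unfold Spec_checkWithNumber; infer_instance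

-- ===== CLAIM (what is proved, stated in full; the proofs are below) =====
def Claim_equal_checkWithNumber : Prop := ∀ (word : String), Dom_checkWithNumber word → Spec_checkWithNumber word (checkWithNumber word)

-- ===== LEMMAS AND PROOFS =====

-- A's if-chain, reformulated as membership in the word list
-- A's if-chain: no branch fires when the buffer is not a number word
theorem pvStepA_neg (a box : List Char) (c : Char) (h : (a ++ [c]) ∉ pvWords) :
    pvStepA (a, box) c = (a ++ [c], box) := by
  simp only [pvWords, List.mem_cons, List.not_mem_nil, or_false, not_or] at h
  obtain ⟨h1, h2, h3, h4, h5, h6, h7, h8, h9, h10, h11⟩ := h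
  simp only [pvStepA]
  rw [if_neg h1, if_neg h2, if_neg h3, if_neg h4, if_neg h5, if_neg h6, if_neg h7,
     if_neg h8, if_neg h9, if_neg h10, if_neg h11]

-- A's if-chain: the branch for the word the buffer equals fires and flushes it
theorem pvStepA_pos (a box : List Char) (c : Char) (h : (a ++ [c]) ∈ pvWords) :
    pvStepA (a, box) c = ([], box ++ (a ++ [c])) := by
  simp only [pvWords, List.mem_cons, List.not_mem_nil, or_false] at h
  simp only [pvStepA]
  rcases h with h|h|h|h|h|h|h|h|h|h|h <;> rw [h] <;> rfl

-- no proper prefix of a number word is a number word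
theorem pvFact1 : ∀ w ∈ pvWords, ∀ k, k < w.length → w.take k ∉ pvWords := by decide

-- number words are nonempty
theorem pvFact2 : ∀ w ∈ pvWords, w ≠ [] := by decide

-- once the buffer can never again equal a word, the box never changes
theorem pvStuck : ∀ (cs a box : List Char),
    (∀ k, (a ++ cs.take k) ∉ pvWords) →
    (cs.foldl pvStepA (a, box)).2 = box := by
  intro cs
  induction cs with
  | nil => intro a box _; rfl
  | cons c cs ih =>
    intro a box h
    have h1 : (a ++ [c]) ∉ pvWords := by
      have := h 1
      simpa using this
    rw [List.foldl_cons, pvStepA_neg a box c h1]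
    apply ih
    intro k
    have := h (k + 1)
    simpa [List.append_assoc] using this
-- running A over a full word (buffer already holding p, rest s) flushes it
theorem pvRun : ∀ (s p cs box : List Char),
    (p ++ s) ∈ pvWords → s ≠ [] →
    (∀ k, k < s.length → (p ++ s.take k) ∉ pvWords) →
    ((s ++ cs).foldl pvStepA (p, box)) = cs.foldl pvStepA ([], box ++ (p ++ s)) := by
  intro s
  induction s with
  | nil => intro p cs box _ hne _; exact absurd rfl hne
  | cons c s ih =>
    intro p cs box hmem _ hpre
    by_cases hs : s = []
    · subst hs
      have : (p ++ [c]) ∈ pvWords := by simpa using hmem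
      rw [List.cons_append, List.foldl_cons, pvStepA_pos p box c this]
      simp
    · have h1 : (p ++ [c]) ∉ pvWords := by
        have := hpre 1 (by cases s with | nil => exact absurd rfl hs | cons _ _ => simp)
        simpa using this
      rw [List.cons_append, List.foldl_cons, pvStepA_neg p box c h1]
      have := ih (p ++ [c]) cs box (by simpa [List.append_assoc] using hmem) hs
        (by
          intro k hk
          have := hpre (k + 1) (by simpa using Nat.succ_lt_succ hk)
          simpa [List.append_assoc] using this)
      simpa [List.append_assoc] using this

-- main invariant: A's fold with empty buffer computes B's positional loop
theorem pvMain : ∀ (n : Nat) (cs box : List Char), cs.length ≤ n →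
    (cs.foldl pvStepA ([], box)).2 = pvGoB n cs box := by
  intro n
  induction n with
  | zero =>
    intro cs box h
    have : cs = [] := List.eq_nil_of_length_eq_zero (Nat.le_zero.mp h)
    subst this; rfl
  | succ n ih =>
    intro cs box h
    cases hf : pvWords.find? (fun w => w.isPrefixOf cs) with
    | none =>
      have hnone : ∀ w ∈ pvWords, ¬ (w.isPrefixOf cs = true) := by
        intro w hw
        have := List.find?_eq_none.mp hf w hw
        simpa using this
      have hstuck : ∀ k, (([] : List Char) ++ cs.take k) ∉ pvWords := by
        intro k hk
        have hpref : (cs.take k).isPrefixOf cs = true :=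
          List.isPrefixOf_iff_prefix.mpr (List.take_prefix k cs)
        exact hnone _ (by simpa using hk) hpref
      rw [pvStuck cs [] box hstuck]
      simp [pvGoB, hf]
    | some w =>
      have hw : w ∈ pvWords := List.mem_of_find?_eq_some hf
      have hpref : w.isPrefixOf cs = true := by
        have := List.find?_some hf
        simpa using this
      obtain ⟨t, ht⟩ := List.isPrefixOf_iff_prefix.mp hpref
      subst ht
      have hrun := pvRun w [] t box (by simpa using hw) (pvFact2 w hw)
        (by intro k hk; simpa using pvFact1 w hw k hk)
      rw [hrun]
      have hwlen : 1 ≤ w.length := by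
        cases w with
        | nil => exact absurd rfl (pvFact2 _ hw)
        | cons _ _ => simp
      have hlen : t.length ≤ n := by
        have := h
        simp only [List.length_append] at this
        omega
      have := ih t (box ++ ([] ++ w)) hlen
      rw [this]
      simp [pvGoB, hf]

-- ===== VERDICT (by name: the statement is the Claim_ definition above) =====
theorem checkWithNumber_spec : Claim_equal_checkWithNumber := by
  intro word _
  unfold Spec_checkWithNumber checkWithNumber checkWithNumber_alt
  rw [pvMain word.toList.length word.toList [] (le_refl _)]
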